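-- pv_equiv track=rewrite | github.com/wittfabian/djangae | djangae/contrib/search/query.py | _tokenize_query_string
-- ===== SOURCE A (Python) =====
-- def _tokenize_query_string(query_string):
--     """
--         Returns a list of WordDocumentField keys to fetch
--         based on the query_string
--     """
--
--     # We always lower case. Even Atom fields are case-insensitive
--     query_string = query_string.lower()
--
--     branches = query_string.split(" or ")
--
--     # Split into [(fieldname, query)] tuples for each branch
--     field_queries = [
--         tuple(x.split(":", 1)) if ":" in x else (None, x)
--         for x in branches
--     ]
--
--     # Remove empty queries
--     field_queries = [x for x in field_queries if x[1].strip()]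
--
--     # By this point, given the following query:
--     # pikachu OR name:charmander OR name:"Mew Two" OR "Mr Mime"
--     # we should have:
--     # [(None, "pikachu"), ("name", "charmander"), ("name", '"mew two"'), (None, '"mr mime"')]
--     # Note that exact matches will have quotes around them
--
--     result = [
--         ("exact" if x[1][0] == '"' and x[1][-1] == '"' else "word", x[0], x[1].strip('"'))
--         for x in field_queries
--     ]
--
--     # Now we should have
--     # [
--     #     ("word", None, "pikachu"), ("word", "name", "charmander"),
--     #     ("exact", "name", 'mew two'), ("exact", None, 'mr mime')
--     # ]
--
--     return result
-- ===== SOURCE B (Python) =====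
-- def _tokenize_query_string(query_string):
--     """Recursive descent over the branch list: each branch is parsed with
--     find() and slicing (no split-on-colon), classified with startswith/endswith
--     (no indexing), and the result is built back-to-front by consing onto the
--     recursive result (no intermediate lists)."""
--     def parse(branches):
--         if not branches:
--             return []
--         branch, rest = branches[0], parse(branches[1:])
--         idx = branch.find(":")
--         if idx == -1:
--             field, query = None, branch
--         else:
--             field, query = branch[:idx], branch[idx + 1:]
--         if not query.strip():
--             return rest
--         kind = "exact" if query.startswith('"') and query.endswith('"') else "word"
--         return [(kind, field, query.strip('"'))] + rest
--
--     return parse(query_string.lower().split(" or "))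
-- ===== Notes on version B (the rewrite author's own statement) =====
-- stated objective: alternative
-- what changed: Replaced the three sequential comprehensions by a recursive descent over the branch list that builds the result back-to-front by consing, parses each branch with find() plus slicing instead of split(':', 1), and classifies with startswith/endswith instead of indexing query[0]/query[-1].
import Mathlib
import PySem

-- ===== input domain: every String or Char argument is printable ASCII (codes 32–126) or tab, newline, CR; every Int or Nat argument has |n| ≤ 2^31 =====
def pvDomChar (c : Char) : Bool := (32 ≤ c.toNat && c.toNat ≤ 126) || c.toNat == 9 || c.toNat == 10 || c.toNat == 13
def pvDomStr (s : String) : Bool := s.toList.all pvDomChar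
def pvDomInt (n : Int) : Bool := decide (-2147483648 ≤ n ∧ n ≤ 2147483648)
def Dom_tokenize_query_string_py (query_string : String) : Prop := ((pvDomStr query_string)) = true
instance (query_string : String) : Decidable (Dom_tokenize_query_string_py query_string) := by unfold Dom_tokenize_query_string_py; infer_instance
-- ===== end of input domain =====

-- B replaces A's three comprehensions by a recursive descent over the branch list that parses each
-- branch with find+slicing and classifies with startswith/endswith (objective: alternative).

-- ===== PORT A =====
-- A-side helpers: the two comprehension bodies of A.
-- 'tuple(x.split(":", 1)) if ":" in x else (None, x)'
def pvFieldQueryA (x : List Char) : Option (List Char) × List Char :=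
  if PySem.Chars.isIn [':'] x then
    match PySem.Chars.splitOnMax x [':'] 1 with
    | f :: q :: _ => (some f, q)
    | _ => (none, x)   -- unreachable: a split with ":" present yields ≥ 2 pieces
  else (none, x)

-- '("exact" if x[1][0] == '"' and x[1][-1] == '"' else "word", x[0], x[1].strip('"'))'
-- x[1][0] / x[1][-1] ported with pyGetD: A only reaches this after the emptiness filter, so x.2 ≠ [].
def pvTokenA (x : Option (List Char) × List Char) : String × Option String × String :=
  ((if (PySem.List.pyGetD x.2 0 ' ' == '"') && (PySem.List.pyGetD x.2 (-1) ' ' == '"')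
      then "exact" else "word"),
   x.1.map (fun cs => String.ofList cs),
   String.ofList (PySem.Chars.stripChars x.2 ['"']))

-- A: lower; split on " or "; map to (field, query) pairs; filter out empty queries; map to result triples.
def tokenize_query_string_py (query_string : String) : List (String × Option String × String) :=
  let qs : List Char := PySem.Chars.lower query_string.toList
  let branches : List (List Char) := PySem.Chars.splitOn qs (" or ".toList)
  let field_queries : List (Option (List Char) × List Char) := branches.map pvFieldQueryA
  let field_queries2 : List (Option (List Char) × List Char) :=
    field_queries.filter (fun x => !(PySem.Chars.strip x.2).isEmpty)
  field_queries2.map pvTokenA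

-- ===== PORT B =====
-- B-side helper: the recursive 'parse' — the head branch is parsed with find+slices and classified
-- with startswith/endswith, and its triple (if any) is consed onto the recursive result of the tail.
def pvParseB : List (List Char) → List (String × Option String × String)
  | [] => []
  | branch :: bs =>
    let rest := pvParseB bs
    let idx : Int := PySem.Chars.find branch [':']
    let fq : Option (List Char) × List Char :=
      if idx == -1 then (none, branch)
      else (some (PySem.Chars.slice branch none (some idx)),
            PySem.Chars.slice branch (some (idx + 1)) none)
    if (PySem.Chars.strip fq.2).isEmpty then rest
    else ((if PySem.Chars.startswith fq.2 ['"'] && PySem.Chars.endswith fq.2 ['"']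
             then "exact" else "word"),
          fq.1.map (fun cs => String.ofList cs),
          String.ofList (PySem.Chars.stripChars fq.2 ['"'])) :: rest

-- B: lower, split on " or ", then the recursive descent.
def tokenize_query_string_py_alt (query_string : String) : List (String × Option String × String) :=
  pvParseB (PySem.Chars.splitOn (PySem.Chars.lower query_string.toList) (" or ".toList))

-- ===== PRECONDITION & SPEC =====
def Spec_tokenize_query_string_py (query_string : String) (out : List (String × Option String × String)) : Prop := out = tokenize_query_string_py_alt query_string
instance (query_string : String) (out : List (String × Option String × String)) : Decidable (Spec_tokenize_query_string_py query_string out) := by unfold Spec_tokenize_query_string_py; infer_instance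

-- ===== CLAIM (what is proved, stated in full; the proofs are below) =====
def Claim_equal_tokenize_query_string_py : Prop := ∀ (query_string : String), Dom_tokenize_query_string_py query_string → Spec_tokenize_query_string_py query_string (tokenize_query_string_py query_string)

-- ===== LEMMAS AND PROOFS =====

-- [':'] is a prefix of l.drop i iff l[i] is ':'.
theorem pv_prefix_drop (l : List Char) (i : Nat) : [':'] <+: l.drop i ↔ l[i]? = some ':' := by
  rw [← List.head?_drop]
  cases l.drop i <;> simp [List.cons_prefix_cons, eq_comm]

-- The first index holding ':' is the length of the colon-free prefix.
theorem pv_takeWhile_len (x : List Char) (n : Nat) (hx : x[n]? = some ':')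
    (hlt : ∀ i < n, x[i]? ≠ some ':') : (x.takeWhile (· != ':')).length = n := by
  induction x generalizing n with
  | nil => simp at hx
  | cons c t ih =>
    cases n with
    | zero =>
      simp only [List.getElem?_cons_zero, Option.some.injEq] at hx
      simp [hx]
    | succ m =>
      have hc : c ≠ ':' := by
        have := hlt 0 (Nat.succ_pos m); simpa using this
      simp only [List.takeWhile_cons]
      rw [if_pos (by simpa using hc)]
      simp only [List.length_cons]
      congr 1
      exact ih m (by simpa using hx) (fun i hi => by
        have := hlt (i+1) (by omega); simpa using this)

-- branch.find(":") when ':' occurs: the length of the colon-free prefix.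
theorem pv_find_colon (x : List Char) (h : ':' ∈ x) :
    PySem.Chars.find x [':'] = ((x.takeWhile (· != ':')).length : Int) := by
  have h0 : 0 ≤ PySem.Chars.find x [':'] := by
    rw [PySem.Chars.find_nonneg_iff]
    exact List.singleton_infix_iff ':' x |>.mpr h
  obtain ⟨hpre, hmin⟩ := PySem.Chars.find_spec (s := x) (sub := [':']) h0
  have := pv_takeWhile_len x (PySem.Chars.find x [':']).toNat
    ((pv_prefix_drop x _).mp hpre)
    (fun i hi hc => hmin i hi ((pv_prefix_drop x i).mpr hc))
  omega

theorem pv_find_none (x : List Char) (h : ':' ∉ x) : PySem.Chars.find x [':'] = -1 := by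
  rw [PySem.Chars.find_eq_neg_one_iff]
  simpa [List.singleton_infix_iff] using h

theorem pv_isIn (x : List Char) : PySem.Chars.isIn [':'] x = true ↔ ':' ∈ x := by
  rw [PySem.Chars.isIn_iff_infix, List.singleton_infix_iff]

-- splitOnMax.go with maxsplit exhausted: the rest is one piece.
theorem pv_go_zero (fuel : Nat) (l cur : List Char) (acc : List (List Char)) :
    PySem.Chars.splitOnMax.go [':'] fuel 0 l cur acc = ((cur.reverse ++ l) :: acc).reverse := by
  induction fuel generalizing l cur acc with
  | zero => simp [PySem.Chars.splitOnMax.go]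
  | succ f ih =>
    cases l with
    | nil => simp [PySem.Chars.splitOnMax.go]
    | cons c rest => simp [PySem.Chars.splitOnMax.go]

-- splitOnMax.go with maxsplit 1 on sep ':': split at the first colon, if any.
theorem pv_go_one (fuel : Nat) (l cur : List Char) (acc : List (List Char))
    (hf : l.length ≤ fuel) :
    PySem.Chars.splitOnMax.go [':'] fuel 1 l cur acc =
      acc.reverse ++ (if ':' ∈ l then
        [cur.reverse ++ l.takeWhile (· != ':'), l.drop ((l.takeWhile (· != ':')).length + 1)]
      else [cur.reverse ++ l]) := by
  induction fuel generalizing l cur acc with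
  | zero =>
    have : l = [] := List.eq_nil_of_length_eq_zero (Nat.le_zero.mp hf)
    subst this; simp [PySem.Chars.splitOnMax.go]
  | succ f ih =>
    cases l with
    | nil => simp [PySem.Chars.splitOnMax.go]
    | cons c rest =>
      by_cases hc : c = ':'
      · subst hc
        simp [PySem.Chars.splitOnMax.go, List.isPrefixOf, pv_go_zero]
      · have h1 : List.isPrefixOf [':'] (c :: rest) = false := by
          simp [List.isPrefixOf_cons₂]
          intro h; exact absurd h.symm hc
        have hr : rest.length ≤ f := by simpa using hf
        simp only [PySem.Chars.splitOnMax.go, h1, Bool.false_eq_true, if_false]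
        rw [if_neg (by decide)]
        rw [ih rest (c :: cur) acc hr]
        have hcb : (c != ':') = true := by simp [hc]
        by_cases hmem : ':' ∈ rest
        · simp [hmem, hcb, Ne.symm hc]
        · simp [hmem, List.takeWhile_cons, Ne.symm hc]

-- x.split(":", 1) with ':' present.
theorem pv_splitOnMax_one (x : List Char) (h : ':' ∈ x) :
    PySem.Chars.splitOnMax x [':'] 1 =
      [x.takeWhile (· != ':'), x.drop ((x.takeWhile (· != ':')).length + 1)] := by
  rw [show PySem.Chars.splitOnMax x [':'] 1
        = PySem.Chars.splitOnMax.go [':'] (x.length + 1) 1 x [] [] by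
      simp [PySem.Chars.splitOnMax]]
  rw [pv_go_one _ _ _ _ (by omega)]
  simp [h]

theorem pv_take_takeWhile (p : Char → Bool) (l : List Char) :
    l.take (l.takeWhile p).length = l.takeWhile p := by
  induction l with
  | nil => simp
  | cons c t ih => by_cases h : p c <;> simp [h, ih]

-- B's find+slice parse of one branch equals A's isIn+split parse.
theorem pv_branch (x : List Char) :
    (if (PySem.Chars.find x [':'] : Int) == -1 then ((none : Option (List Char)), x)
     else (some (PySem.Chars.slice x none (some (PySem.Chars.find x [':']))),
           PySem.Chars.slice x (some (PySem.Chars.find x [':'] + 1)) none))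
    = pvFieldQueryA x := by
  by_cases h : ':' ∈ x
  · have hf := pv_find_colon x h
    have hne : (PySem.Chars.find x [':'] == -1) = false := by
      rw [hf]; simp
    rw [hne, if_neg (by simp), pvFieldQueryA, if_pos ((pv_isIn x).mpr h),
      pv_splitOnMax_one x h, hf]
    simp only [PySem.Chars.slice_eq_listSlice]
    rw [PySem.List.slice_to_natCast, pv_take_takeWhile]
    rw [show ((((x.takeWhile (· != ':')).length : Int)) + 1)
          = (((x.takeWhile (· != ':')).length + 1 : Nat) : Int) by push_cast; ring]
    rw [PySem.List.slice_from_natCast]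
  · rw [pv_find_none x h]
    rw [if_pos (by decide)]
    unfold pvFieldQueryA
    rw [if_neg (fun hc => h ((pv_isIn x).mp hc))]

theorem pv_singleton_suffix (a b : Char) (l : List Char) : [a] <:+ (l ++ [b]) ↔ a = b := by
  constructor
  · rintro ⟨t, ht⟩
    have := congrArg List.getLast? ht
    simpa using this
  · rintro rfl; exact List.suffix_append l [a]

-- On a nonempty query, q[0]/q[-1] indexing agrees with startswith/endswith.
theorem pv_classify (q : List Char) (hq : q ≠ []) :
    ((PySem.List.pyGetD q 0 ' ' == '"') && (PySem.List.pyGetD q (-1) ' ' == '"')) =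
    (PySem.Chars.startswith q ['"'] && PySem.Chars.endswith q ['"']) := by
  congr 1
  · obtain ⟨c, t, rfl⟩ := List.exists_cons_of_ne_nil hq
    rw [PySem.List.pyGetD_zero_cons, Bool.eq_iff_iff]
    rw [PySem.Chars.startswith_iff, List.cons_prefix_cons]
    simp only [beq_iff_eq, List.nil_prefix, and_true]
    exact eq_comm
  · rcases List.eq_nil_or_concat q with rfl | ⟨ys, y, rfl⟩
    · exact absurd rfl hq
    · rw [List.concat_eq_append, PySem.List.pyGetD_neg_one_append_singleton, Bool.eq_iff_iff]
      rw [PySem.Chars.endswith_iff, pv_singleton_suffix]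
      simp only [beq_iff_eq]
      exact eq_comm

theorem pv_strip_ne (q : List Char) (h : (PySem.Chars.strip q).isEmpty = false) : q ≠ [] := by
  rintro rfl; revert h; decide

-- B's recursion over the branch list equals A's map-filter-map pipeline.
theorem pv_parse_eq (bs : List (List Char)) :
    pvParseB bs
      = ((bs.map pvFieldQueryA).filter
          (fun x => !(PySem.Chars.strip x.2).isEmpty)).map pvTokenA := by
  induction bs with
  | nil => rfl
  | cons x t ih =>
    show (let rest := pvParseB t; _) = _
    simp only [pvParseB, pv_branch x, List.map_cons, List.filter_cons]
    by_cases hs : (PySem.Chars.strip (pvFieldQueryA x).2).isEmpty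
    · simp [hs, ih]
    · have hq : (pvFieldQueryA x).2 ≠ [] :=
        pv_strip_ne _ (Bool.not_eq_true _ ▸ Bool.eq_false_iff.mpr hs)
      simp [hs, ih, pvTokenA, pv_classify _ hq]

-- ===== VERDICT (by name: the statement is the Claim_ definition above) =====
theorem tokenize_query_string_py_spec : Claim_equal_tokenize_query_string_py := by
  intro qs _
  unfold Spec_tokenize_query_string_py tokenize_query_string_py tokenize_query_string_py_alt
  rw [pv_parse_eq]
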